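-- pv_equiv track=rewrite | github.com/Vintrdottir/SailRAG | backend/src/sailrag/chunking/chunker.py | looks_like_table_of_contents
-- ===== SOURCE A (Python) =====
-- def looks_like_table_of_contents(text: str) -> bool:
--     t = (text or "").lower()
--     if "table of contents" in t or t.strip().startswith("contents"):
--         return True
--
--     # Heuristic: lots of dot leaders + many short lines ending with numbers
--     dot_leaders = t.count("...")  # crude but works well
--     lines = [ln.strip() for ln in t.splitlines() if ln.strip()]
--     ends_with_number = sum(1 for ln in lines if ln and ln[-1].isdigit())
--
--     if dot_leaders >= 5 and ends_with_number >= 5: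
--         return True
--
--     # Another heuristic: many lines with tabs and trailing numbers
--     if sum(1 for ln in lines if "\t" in ln and any(ch.isdigit() for ch in ln[-6:])) >= 8:
--         return True
--
--     return False
-- ===== SOURCE B (Python) =====
-- def looks_like_table_of_contents(text: str) -> bool:
--     t = (text or "").lower()
--     if "table of contents" in t or t.strip().startswith("contents"):
--         return True
--     # Streaming character automata: dot leaders are counted by a run-length
--     # automaton over the text, and each line is judged by a single left-to-right
--     # scan keeping only a 6-char window — no stripped strings are materialised.
--     dots = run = 0
--     for ch in t:
--         if ch == ".":
--             run += 1
--             if run == 3: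
--                 dots += 1
--                 run = 0
--         else:
--             run = 0
--     ends = tabs = 0
--     for raw in t.splitlines():
--         window = []      # last <= 6 chars of the line stripped so far
--         pend = []        # whitespace run after the last non-space char
--         has_tab = pend_tab = False
--         for ch in raw:
--             if ch.isspace():
--                 if window:
--                     pend.append(ch)
--                     if ch == "\t":
--                         pend_tab = True
--             else:
--                 window = (window + pend + [ch])[-6:]
--                 pend = []
--                 if pend_tab:
--                     has_tab = True
--                 pend_tab = False
--         if window:
--             if window[-1].isdigit():
--                 ends += 1
--             if has_tab and any(c.isdigit() for c in window):
--                 tabs += 1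
--     return (dots >= 5 and ends >= 5) or tabs >= 8
-- ===== Notes on version B (the rewrite author's own statement) =====
-- stated objective: alternative
-- what changed: A materialises stripped line strings and scans them with substring/count/slice/index operations in staged passes; B is a streaming character automaton: dot leaders are counted by a run-length automaton over the text and each line is judged in one left-to-right char scan that keeps only a 6-char window, a pending-whitespace buffer and two tab flags, never building stripped strings.
import Mathlib
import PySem

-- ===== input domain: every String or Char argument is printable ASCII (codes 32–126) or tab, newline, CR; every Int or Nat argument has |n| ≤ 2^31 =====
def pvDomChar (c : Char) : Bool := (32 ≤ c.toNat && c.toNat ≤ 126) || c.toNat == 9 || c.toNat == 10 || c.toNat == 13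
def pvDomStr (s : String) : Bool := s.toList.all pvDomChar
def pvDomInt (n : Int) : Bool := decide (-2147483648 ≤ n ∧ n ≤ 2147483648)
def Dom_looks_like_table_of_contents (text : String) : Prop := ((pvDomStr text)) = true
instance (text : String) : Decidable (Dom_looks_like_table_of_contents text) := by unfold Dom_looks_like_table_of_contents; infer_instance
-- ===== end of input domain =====

-- B replaces A's stripped-line strings and staged substring/slice scans by streaming
-- character automata (a run-length dot counter and a per-line 6-char-window scan); alternative, same O(n) cost.

-- ===== PORT A =====
def looks_like_table_of_contents (text : String) : Bool :=
  let t := PySem.Str.lower text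
  if PySem.Str.isIn "table of contents" t || PySem.Str.startswith (PySem.Str.strip t) "contents" then
    true
  else
    let dot_leaders := PySem.Str.count t "..."
    let lines := ((PySem.Str.splitlines t).map PySem.Str.strip).filter (fun ln => PySem.Str.len ln != 0)
    let ends_with_number := lines.foldl (fun acc ln =>
      if PySem.Str.len ln != 0 && ((PySem.Str.pyGet? ln (-1)).elim false PySem.Chars.isdigit)
      then acc + 1 else acc) (0 : Nat)
    if decide (5 ≤ dot_leaders) && decide (5 ≤ ends_with_number) then true
    else if decide (8 ≤ lines.foldl (fun acc ln =>
        if PySem.Str.isIn "\t" ln && (PySem.Str.slice ln (some (-6)) none).toList.any PySem.Chars.isdigit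
        then acc + 1 else acc) (0 : Nat)) then true
    else false

-- ===== PORT B =====
-- B-side helper: the per-line automaton step (window, pend, has_tab, pend_tab)
def pvLineStep (s : List Char × List Char × Bool × Bool) (ch : Char) :
    List Char × List Char × Bool × Bool :=
  if PySem.Chars.isspace ch then
    if s.1 = [] then s
    else (s.1, s.2.1 ++ [ch], s.2.2.1, s.2.2.2 || decide (ch = '\t'))
  else
    (PySem.List.slice (s.1 ++ s.2.1 ++ [ch]) (some (-6)) none, [],
     s.2.2.1 || s.2.2.2, false)

def looks_like_table_of_contents_alt (text : String) : Bool :=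
  let t := PySem.Str.lower text
  if PySem.Str.isIn "table of contents" t || PySem.Str.startswith (PySem.Str.strip t) "contents" then
    true
  else
    let dr := t.toList.foldl (fun (p : Nat × Nat) ch =>
      if ch = '.' then
        if p.2 + 1 = 3 then (p.1 + 1, 0) else (p.1, p.2 + 1)
      else (p.1, 0)) ((0 : Nat), (0 : Nat))
    let et := (PySem.Str.splitlines t).foldl (fun (p : Nat × Nat) raw =>
      let st := raw.toList.foldl pvLineStep ([], [], false, false)
      if st.1 = [] then p
      else
        ((if (PySem.List.pyGet? st.1 (-1)).elim false PySem.Chars.isdigit then p.1 + 1 else p.1),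
         (if st.2.2.1 && st.1.any PySem.Chars.isdigit then p.2 + 1 else p.2)))
      ((0 : Nat), (0 : Nat))
    (decide (5 ≤ dr.1) && decide (5 ≤ et.1)) || decide (8 ≤ et.2)

-- ===== PRECONDITION & SPEC =====
def Spec_looks_like_table_of_contents (text : String) (out : Bool) : Prop := out = looks_like_table_of_contents_alt text
instance (text : String) (out : Bool) : Decidable (Spec_looks_like_table_of_contents text out) := by unfold Spec_looks_like_table_of_contents; infer_instance

-- ===== CLAIM (what is proved, stated in full; the proofs are below) =====
def Claim_equal_looks_like_table_of_contents : Prop := ∀ (text : String), Dom_looks_like_table_of_contents text → Spec_looks_like_table_of_contents text (looks_like_table_of_contents text)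

-- ===== LEMMAS AND PROOFS =====

-- greedy non-overlapping count of "..." (specification of Python str.count("..."))
def pvDots : List Char → Nat
  | '.' :: '.' :: '.' :: t => pvDots t + 1
  | _ :: t => pvDots t
  | [] => 0

theorem pvDots_not_pre (h : Char) (t : List Char) (hp : ¬ ['.','.','.'] <+: (h :: t)) :
    pvDots (h :: t) = pvDots t := by
  rw [pvDots.eq_def]
  split
  · next u heq =>
    rw [heq] at hp
    exact absurd ⟨u, rfl⟩ hp
  · next l c u _ heq =>
    rw [List.cons.injEq] at heq
    rw [heq.2]
  · simp_all

theorem pv_count_go (fuel : Nat) (l : List Char) (acc : Nat) (h : l.length ≤ fuel) :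
    PySem.Chars.count.go ['.', '.', '.'] fuel l acc = acc + pvDots l := by
  induction fuel generalizing l acc with
  | zero =>
    have : l = [] := List.eq_nil_of_length_eq_zero (Nat.le_zero.mp h)
    subst this; rfl
  | succ fuel ih =>
    match l with
    | [] => rfl
    | c :: t =>
      rw [PySem.Chars.count.go]
      by_cases hp : ['.','.','.'].isPrefixOf (c :: t)
      · obtain ⟨u, hu⟩ := List.isPrefixOf_iff_prefix.mp hp
        simp only [hp, if_true]
        rw [← hu] at h ⊢
        rw [List.drop_left]
        rw [ih u (acc+1) (by simp at h; omega)]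
        rw [show pvDots (['.','.','.'] ++ u) = pvDots u + 1 from rfl]; omega
      · have hp' : (['.','.','.'].isPrefixOf (c :: t)) = false := by simp [hp]
        rw [ih t acc (by simpa using h),
            pvDots_not_pre c t (fun hx => hp (List.isPrefixOf_iff_prefix.mpr hx))]
        simp [hp']

theorem pv_count_eq (l : List Char) : PySem.Chars.count l ['.', '.', '.'] = pvDots l := by
  rw [PySem.Chars.count]
  simpa using pv_count_go l.length l 0 (le_refl _)

theorem pv_dot_auto (l : List Char) (d run : Nat) (h : run ≤ 2) :
    (l.foldl (fun (p : Nat × Nat) ch =>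
      if ch = '.' then
        if p.2 + 1 = 3 then (p.1 + 1, 0) else (p.1, p.2 + 1)
      else (p.1, 0)) (d, run)).1 = d + pvDots (List.replicate run '.' ++ l) := by
  induction l generalizing d run with
  | nil =>
    simp only [List.foldl_nil, List.append_nil]
    interval_cases run <;> simp [pvDots]
  | cons c t ih =>
    rw [List.foldl_cons]
    by_cases hc : c = '.'
    · subst hc
      by_cases hr : run + 1 = 3
      · have hrun : run = 2 := by omega
        subst hrun
        have hstep : (if ('.' : Char) = '.' then if (d, 2).2 + 1 = 3 then ((d, 2).1 + 1, 0) else ((d, 2).1, (d, 2).2 + 1) else ((d, 2).1, 0)) = ((d + 1 : Nat), (0 : Nat)) := by norm_num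
        rw [hstep, ih (d+1) 0 (by omega)]
        rw [show (List.replicate 2 '.' ++ '.'::t) = ('.'::'.'::'.'::t) from rfl,
            show pvDots ('.'::'.'::'.'::t) = pvDots t + 1 from rfl]
        simp; omega
      · have hstep : (if ('.' : Char) = '.' then if (d, run).2 + 1 = 3 then ((d, run).1 + 1, 0) else ((d, run).1, (d, run).2 + 1) else ((d, run).1, 0)) = ((d : Nat), (run + 1 : Nat)) := by simp [hr]
        rw [hstep, ih d (run+1) (by omega)]
        congr 2
        rw [List.replicate_succ' (n := run)]
        simp
    · have hstep : (if c = '.' then if (d, run).2 + 1 = 3 then ((d, run).1 + 1, 0) else ((d, run).1, (d, run).2 + 1) else ((d, run).1, 0)) = ((d : Nat), (0 : Nat)) := by simp [hc]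
      rw [hstep, ih d 0 (by omega)]
      simp only [List.replicate_zero, List.nil_append]
      have h1 : ∀ u : List Char, ¬ (['.','.','.'] <+: (c :: u)) :=
        fun u hpre => hc ((List.cons_prefix_cons.mp hpre).1).symm
      have h2 : ∀ u : List Char, ¬ (['.','.','.'] <+: ('.' :: c :: u)) :=
        fun u hpre => hc (((List.cons_prefix_cons.mp (List.cons_prefix_cons.mp hpre).2)).1).symm
      congr 1
      interval_cases run
      · rw [show (List.replicate 0 '.' ++ c::t) = (c::t) from rfl, pvDots_not_pre _ _ (h1 t)]
      · rw [show (List.replicate 1 '.' ++ c::t) = ('.'::c::t) from rfl,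
            pvDots_not_pre _ _ (h2 t), pvDots_not_pre _ _ (h1 t)]
      · rw [show (List.replicate 2 '.' ++ c::t) = ('.'::'.'::c::t) from rfl,
            pvDots_not_pre _ _ (by
              intro hpre
              exact hc (((List.cons_prefix_cons.mp (List.cons_prefix_cons.mp
                (List.cons_prefix_cons.mp hpre).2).2)).1).symm),
            pvDots_not_pre _ _ (h2 t), pvDots_not_pre _ _ (h1 t)]

theorem pv_tr_append (xs ys : List Char) :
    ((xs.drop (xs.length - 6) ++ ys).drop ((xs.drop (xs.length - 6) ++ ys).length - 6))
      = (xs ++ ys).drop ((xs ++ ys).length - 6) := by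
  have hsuf : (xs.drop (xs.length - 6) ++ ys).drop ((xs.drop (xs.length - 6) ++ ys).length - 6)
      <:+ xs ++ ys := by
    refine (List.drop_suffix _ _).trans ?_
    obtain ⟨u, hu⟩ := List.drop_suffix (xs.length - 6) xs
    exact ⟨u, by rw [← List.append_assoc, hu]⟩
  have hsuf2 : (xs ++ ys).drop ((xs ++ ys).length - 6) <:+ xs ++ ys := List.drop_suffix _ _
  rw [List.suffix_iff_eq_drop.mp hsuf, List.suffix_iff_eq_drop.mp hsuf2]
  congr 1
  simp only [List.length_drop, List.length_append]
  omega

-- rstrip facts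
theorem pv_rstrip_concat_ws (l : List Char) (c : Char) (h : PySem.Chars.isspace c = true) :
    PySem.Chars.rstrip (l ++ [c]) = PySem.Chars.rstrip l := by
  simp [PySem.Chars.rstrip, h]

theorem pv_rstrip_concat_nws (l : List Char) (c : Char) (h : PySem.Chars.isspace c = false) :
    PySem.Chars.rstrip (l ++ [c]) = l ++ [c] := by
  simp [PySem.Chars.rstrip, h]

theorem pv_rstrip_prefix (l : List Char) : PySem.Chars.rstrip l <+: l := by
  rw [← List.reverse_suffix]
  show (List.dropWhile PySem.Chars.isspace l.reverse).reverse.reverse <:+ l.reverse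
  rw [List.reverse_reverse]
  exact List.dropWhile_suffix _

theorem pv_rstrip_eq_take (l : List Char) :
    l = PySem.Chars.rstrip l ++ l.drop (PySem.Chars.rstrip l).length := by
  conv_lhs => rw [← List.take_append_drop (PySem.Chars.rstrip l).length l]
  congr 1
  exact (List.prefix_iff_eq_take.mp (pv_rstrip_prefix l)).symm

theorem pv_rstrip_ne_nil (l : List Char) (h : PySem.Chars.lstrip l ≠ []) :
    PySem.Chars.rstrip (PySem.Chars.lstrip l) ≠ [] := by
  intro hq
  have hhead := List.head_dropWhile_not PySem.Chars.isspace (l := l) h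
  -- all chars of lstrip l are whitespace since rstrip = []
  have hall : ∀ x ∈ PySem.Chars.lstrip l, PySem.Chars.isspace x = true := by
    intro x hx
    have : (List.dropWhile PySem.Chars.isspace (PySem.Chars.lstrip l).reverse) = [] := by
      have := congrArg List.reverse hq
      simpa [PySem.Chars.rstrip] using this
    exact List.dropWhile_eq_nil_iff.mp this x (by simpa using hx)
  have hh2 : PySem.Chars.isspace ((PySem.Chars.lstrip l).head h) = false := hhead
  exact absurd (hall _ (List.head_mem h)) (by simp [hh2])

theorem pv_strip_def (s : List Char) :
    PySem.Chars.strip s = PySem.Chars.rstrip (PySem.Chars.lstrip s) := rfl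

theorem pv_lstrip_concat_of_ne (s : List Char) (c : Char) (h : PySem.Chars.lstrip s ≠ []) :
    PySem.Chars.lstrip (s ++ [c]) = PySem.Chars.lstrip s ++ [c] := by
  show List.dropWhile _ _ = _
  rw [List.dropWhile_append]
  have h' : (List.dropWhile PySem.Chars.isspace s).isEmpty = false := by
    rw [List.isEmpty_eq_false_iff]
    exact h
  rw [h']
  simp only [Bool.false_eq_true, if_false]
  rfl

theorem pvLineStep_ws_nil (p : List Char) (h1 h2 : Bool) (c : Char)
    (hc : PySem.Chars.isspace c = true) :
    pvLineStep ([], p, h1, h2) c = ([], p, h1, h2) := by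
  simp [pvLineStep, hc]

theorem pvLineStep_ws_ne (w p : List Char) (h1 h2 : Bool) (c : Char)
    (hc : PySem.Chars.isspace c = true) (hw : w ≠ []) :
    pvLineStep (w, p, h1, h2) c = (w, p ++ [c], h1, h2 || decide (c = '\t')) := by
  simp [pvLineStep, hc, hw]

theorem pvLineStep_nws (w p : List Char) (h1 h2 : Bool) (c : Char)
    (hc : PySem.Chars.isspace c = false) :
    pvLineStep (w, p, h1, h2) c
      = ((w ++ p ++ [c]).drop ((w ++ p ++ [c]).length - 6), [], h1 || h2, false) := by
  simp only [pvLineStep, hc, Bool.false_eq_true, if_false]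
  rw [PySem.List.slice_from_neg_ofNat _ 6 (by norm_num)]

theorem pv_beq_tab (c : Char) : ('\t' == c) = decide (c = '\t') := by
  by_cases h : c = '\t'
  · subst h; decide
  · rw [beq_eq_false_iff_ne.mpr (Ne.symm h), decide_eq_false h]

theorem pv_contains_concat (l : List Char) (c : Char) :
    (l ++ [c]).contains '\t' = (l.contains '\t' || decide (c = '\t')) := by
  rw [List.contains_append]
  congr 1
  simp only [List.contains_cons, List.contains_nil, Bool.or_false]
  exact pv_beq_tab c

theorem pv_not_tab_of_nws (c : Char) (hc : PySem.Chars.isspace c = false) : ¬ c = '\t' := by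
  intro h; subst h; exact absurd hc (by decide)

theorem pv_line_auto (s : List Char) :
    s.foldl pvLineStep ([], [], false, false)
      = ((PySem.Chars.strip s).drop ((PySem.Chars.strip s).length - 6),
         (PySem.Chars.lstrip s).drop (PySem.Chars.strip s).length,
         (PySem.Chars.strip s).contains '\t',
         ((PySem.Chars.lstrip s).drop (PySem.Chars.strip s).length).contains '\t') := by
  induction s using List.reverseRecOn with
  | nil => simp [PySem.Chars.strip, PySem.Chars.lstrip, PySem.Chars.rstrip]
  | append_singleton s c ih =>
    rw [List.foldl_append, List.foldl_cons, List.foldl_nil, ih]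
    by_cases hL : PySem.Chars.lstrip s = []
    · have hQ : PySem.Chars.strip s = [] := by rw [pv_strip_def, hL]; rfl
      rw [hL, hQ]
      simp only [List.drop_nil]
      by_cases hc : PySem.Chars.isspace c = true
      · have hL' : PySem.Chars.lstrip (s ++ [c]) = [] := by
          show List.dropWhile _ _ = _
          rw [List.dropWhile_append]
          have hdw : List.dropWhile PySem.Chars.isspace s = [] := hL
          simp [hdw, List.dropWhile, hc]
        have hQ' : PySem.Chars.strip (s ++ [c]) = [] := by rw [pv_strip_def, hL']; rfl
        rw [pvLineStep_ws_nil _ _ _ _ hc, hL', hQ']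
        simp
      · have hc' : PySem.Chars.isspace c = false := by simpa using hc
        have hL' : PySem.Chars.lstrip (s ++ [c]) = [c] := by
          show List.dropWhile _ _ = _
          rw [List.dropWhile_append]
          have hdw : List.dropWhile PySem.Chars.isspace s = [] := hL
          simp [hdw, List.dropWhile, hc']
        have hQ' : PySem.Chars.strip (s ++ [c]) = [c] := by
          rw [pv_strip_def, hL']
          simpa using pv_rstrip_concat_nws [] c hc'
        rw [pvLineStep_nws _ _ _ _ _ hc', hL', hQ']
        simp only [List.nil_append, List.length_cons, List.length_nil]
        have : (List.drop (0 + 1 - 6) [c]) = [c] := by norm_num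
        rw [this]
        simp only [List.contains_cons, List.contains_nil, Bool.or_false]
        rw [pv_beq_tab, decide_eq_false (pv_not_tab_of_nws c hc')]
        simp
    · have hQn : PySem.Chars.strip s ≠ [] := pv_rstrip_ne_nil s hL
      have hQlen : 0 < (PySem.Chars.strip s).length := List.length_pos_of_ne_nil hQn
      have hW : (PySem.Chars.strip s).drop ((PySem.Chars.strip s).length - 6) ≠ [] := by
        rw [Ne, List.drop_eq_nil_iff]
        omega
      have hL' : PySem.Chars.lstrip (s ++ [c]) = PySem.Chars.lstrip s ++ [c] :=
        pv_lstrip_concat_of_ne s c hL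
      have hQR := pv_rstrip_eq_take (PySem.Chars.lstrip s)
      rw [← pv_strip_def] at hQR
      have hQle : (PySem.Chars.strip s).length ≤ (PySem.Chars.lstrip s).length :=
        (pv_rstrip_prefix _).length_le
      by_cases hc : PySem.Chars.isspace c = true
      · have hQ' : PySem.Chars.strip (s ++ [c]) = PySem.Chars.strip s := by
          rw [pv_strip_def, hL', pv_rstrip_concat_ws _ _ hc, ← pv_strip_def]
        have hR' : (PySem.Chars.lstrip (s ++ [c])).drop (PySem.Chars.strip (s ++ [c])).length
            = (PySem.Chars.lstrip s).drop (PySem.Chars.strip s).length ++ [c] := by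
          rw [hL', hQ', List.drop_append_of_le_length hQle]
        rw [pvLineStep_ws_ne _ _ _ _ _ hc hW, hQ', hL',
            List.drop_append_of_le_length hQle, pv_contains_concat]
      · have hc' : PySem.Chars.isspace c = false := by simpa using hc
        have hQ' : PySem.Chars.strip (s ++ [c]) = PySem.Chars.lstrip s ++ [c] := by
          rw [pv_strip_def, hL', pv_rstrip_concat_nws _ _ hc']
        have htr := pv_tr_append (PySem.Chars.strip s)
          ((PySem.Chars.lstrip s).drop (PySem.Chars.strip s).length ++ [c])
        have hassoc : PySem.Chars.strip s
              ++ ((PySem.Chars.lstrip s).drop (PySem.Chars.strip s).length ++ [c])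
            = PySem.Chars.lstrip s ++ [c] := by
          rw [← List.append_assoc, ← hQR]
        rw [hassoc] at htr
        have hcont : (PySem.Chars.lstrip s ++ [c]).contains '\t'
            = ((PySem.Chars.strip s).contains '\t'
               || ((PySem.Chars.lstrip s).drop (PySem.Chars.strip s).length).contains '\t') := by
          conv_lhs => rw [hQR]
          rw [List.append_assoc, List.contains_append, pv_contains_concat]
          rw [decide_eq_false (pv_not_tab_of_nws c hc'), Bool.or_false]
        rw [pvLineStep_nws _ _ _ _ _ hc', hQ', hL']
        simp only [List.append_assoc] at htr ⊢
        rw [htr, hcont]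
        simp

theorem pv_getLast_drop (q : List Char) (hq : q ≠ []) :
    (q.drop (q.length - 6)).getLast? = q.getLast? := by
  have hd : q.drop (q.length - 6) ≠ [] := by
    rw [Ne, List.drop_eq_nil_iff]
    have := List.length_pos_of_ne_nil hq
    omega
  conv_rhs => rw [← List.take_append_drop (q.length - 6) q]
  exact (List.getLast?_append_of_ne_nil _ hd).symm

theorem pv_isIn_tab (q : List Char) : PySem.Chars.isIn ['\t'] q = q.contains '\t' := by
  rw [Bool.eq_iff_iff, PySem.Chars.isIn_iff_infix, List.singleton_infix_iff]
  simp

set_option maxHeartbeats 1000000 in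
theorem pv_lines_fold (raws : List String) (a b : Nat) :
    raws.foldl (fun (p : Nat × Nat) raw =>
      let st := raw.toList.foldl pvLineStep ([], [], false, false)
      if st.1 = [] then p
      else
        ((if (PySem.List.pyGet? st.1 (-1)).elim false PySem.Chars.isdigit then p.1 + 1 else p.1),
         (if st.2.2.1 && st.1.any PySem.Chars.isdigit then p.2 + 1 else p.2))) (a, b)
    = (((raws.map PySem.Str.strip).filter (fun ln => PySem.Str.len ln != 0)).foldl (fun acc ln =>
        if PySem.Str.len ln != 0 && ((PySem.Str.pyGet? ln (-1)).elim false PySem.Chars.isdigit)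
        then acc + 1 else acc) a,
       ((raws.map PySem.Str.strip).filter (fun ln => PySem.Str.len ln != 0)).foldl (fun acc ln =>
        if PySem.Str.isIn "\t" ln && (PySem.Str.slice ln (some (-6)) none).toList.any PySem.Chars.isdigit
        then acc + 1 else acc) b) := by
  induction raws generalizing a b with
  | nil => rfl
  | cons r rest ih =>
    simp only [List.foldl_cons, List.map_cons, List.filter_cons]
    rw [pv_line_auto]
    have hlen : PySem.Str.len (PySem.Str.strip r) = (PySem.Chars.strip r.toList).length := by
      simp [pysem]
    by_cases hq : PySem.Chars.strip r.toList = []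
    · have hf : (PySem.Str.len (PySem.Str.strip r) != 0) = false := by
        rw [hlen, hq]
        rfl
      rw [hf]
      simp only [Bool.false_eq_true, if_false, hq, List.drop_nil]
      exact ih a b
    · have hqpos : 0 < (PySem.Chars.strip r.toList).length := List.length_pos_of_ne_nil hq
      have hW : (PySem.Chars.strip r.toList).drop ((PySem.Chars.strip r.toList).length - 6) ≠ [] := by
        rw [Ne, List.drop_eq_nil_iff]; omega
      have ht : (PySem.Str.len (PySem.Str.strip r) != 0) = true := by
        rw [hlen]
        simpa using Nat.pos_iff_ne_zero.mp hqpos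
      rw [ht]
      simp only [if_neg hW]
      -- ends condition
      have hE : (PySem.Str.pyGet? (PySem.Str.strip r) (-1)).elim false PySem.Chars.isdigit
          = (PySem.List.pyGet? ((PySem.Chars.strip r.toList).drop ((PySem.Chars.strip r.toList).length - 6)) (-1)).elim false PySem.Chars.isdigit := by
        rw [PySem.List.pyGet?_neg_one, pv_getLast_drop _ hq]
        have : PySem.Str.pyGet? (PySem.Str.strip r) (-1) = PySem.List.pyGet? (PySem.Chars.strip r.toList) (-1) := by
          simp [pysem]
        rw [this, PySem.List.pyGet?_neg_one]
      -- tab condition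
      have hT1 : PySem.Str.isIn "\t" (PySem.Str.strip r)
          = (PySem.Chars.strip r.toList).contains '\t' := by
        rw [PySem.Str.isIn_eq]
        have hts : ("\t" : String).toList = ['\t'] := by decide
        rw [hts, PySem.Str.toList_strip, pv_isIn_tab]
      have hT2 : (PySem.Str.slice (PySem.Str.strip r) (some (-6)) none).toList.any PySem.Chars.isdigit
          = ((PySem.Chars.strip r.toList).drop ((PySem.Chars.strip r.toList).length - 6)).any PySem.Chars.isdigit := by
        have hsl : (PySem.Str.slice (PySem.Str.strip r) (some (-6)) none).toList
            = PySem.List.slice (PySem.Chars.strip r.toList) (some (-6)) none := by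
          simp [pysem]
        rw [hsl, PySem.List.slice_from_neg_ofNat _ 6 (by norm_num)]
      rw [if_pos trivial, List.foldl_cons, List.foldl_cons,
          ht, Bool.true_and, hE, hT1, hT2]
      exact ih _ _

-- an early-return chain over two Bool tests is their disjunction
theorem pv_bool_chain (x y : Bool) :
    (if x = true then true else if y = true then true else false) = (x || y) := by
  cases x <;> cases y <;> rfl

-- B's dot-run automaton from the count primitive (run started at 0)
theorem pv_dot_auto0 (l : List Char) :
    (l.foldl (fun (p : Nat × Nat) ch =>
      if ch = '.' then
        if p.2 + 1 = 3 then (p.1 + 1, 0) else (p.1, p.2 + 1)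
      else (p.1, 0)) ((0 : Nat), (0 : Nat))).1 = PySem.Chars.count l ['.', '.', '.'] := by
  rw [pv_dot_auto l 0 0 (by omega), pv_count_eq]
  simp

-- ===== VERDICT (by name: the statement is the Claim_ definition above) =====
theorem looks_like_table_of_contents_spec : Claim_equal_looks_like_table_of_contents := by
  intro text _
  unfold Spec_looks_like_table_of_contents looks_like_table_of_contents looks_like_table_of_contents_alt
  have hc : PySem.Str.count (PySem.Str.lower text) "..."
      = PySem.Chars.count (PySem.Str.lower text).toList ['.', '.', '.'] := by
    simp [pysem]
  simp only [pv_lines_fold, pv_dot_auto0, hc]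
  exact if_congr Iff.rfl rfl (pv_bool_chain _ _)
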